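-- pv_equiv track=rewrite | github.com/ganga-devs/ganga | external/dashb/server/monitoringsite/gangausage/googlechart_utilities.py | getMaxValueBarChart
-- ===== SOURCE A (Python) =====
-- def getMaxValueBarChart(barchart_data):
--
--         cols = 0
--         rows = len(barchart_data)
--         if rows > 0:
--             cols = len(barchart_data[0])
--         maxCol = 0
--         sumCol = 0
--
--         #get the max sum of a column -> this is the max column value
--         for j in range(cols):
--             for i in range(rows):
--                 sumCol += barchart_data[i][j]
--             if(sumCol > maxCol):
--                 maxCol = sumCol
--             sumCol = 0
--
--         return maxCol
-- ===== SOURCE B (Python) =====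
-- def getMaxValueBarChart(barchart_data):
--     rows = len(barchart_data)
--     cols = len(barchart_data[0]) if rows > 0 else 0
--     colsums = [0] * cols
--     for row in barchart_data:
--         colsums = [c + row[j] for j, c in enumerate(colsums)]
--     return max(0, max(colsums)) if cols > 0 else 0
-- ===== Notes on version B (the rewrite author's own statement) =====
-- stated objective: alternative
-- what changed: B makes a single row-major pass that accumulates a table of column sums and then takes max(0, max(colsums)), instead of A's column-major nested loops that recompute each column sum independently with a running maximum.
import Mathlib
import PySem

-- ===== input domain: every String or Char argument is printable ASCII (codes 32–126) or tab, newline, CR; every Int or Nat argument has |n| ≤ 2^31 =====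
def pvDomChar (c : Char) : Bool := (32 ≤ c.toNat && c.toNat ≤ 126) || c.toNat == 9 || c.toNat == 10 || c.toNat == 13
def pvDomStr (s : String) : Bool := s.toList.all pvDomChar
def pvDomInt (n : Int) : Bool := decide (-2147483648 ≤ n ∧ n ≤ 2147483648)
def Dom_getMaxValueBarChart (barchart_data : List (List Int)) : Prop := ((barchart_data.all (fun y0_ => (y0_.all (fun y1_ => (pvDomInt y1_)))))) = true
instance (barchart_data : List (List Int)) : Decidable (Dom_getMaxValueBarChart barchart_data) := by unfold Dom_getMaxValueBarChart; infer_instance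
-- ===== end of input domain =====

-- B replaces A's column-major nested loops (recompute each column sum, keep a running max)
-- by one row-major accumulation of a column-sum table followed by max(0, max(colsums)); same cost, different decomposition.

-- ===== PORT A =====
def getMaxValueBarChart (barchart_data : List (List Int)) : Int :=
  let rows : Int := barchart_data.length
  let cols : Int := if rows > 0 then ((PySem.List.pyGetD barchart_data 0 []).length : Int) else 0
  ((PySem.List.pyRange 0 cols 1).foldl (fun (st : Int × Int) j =>
      let sumCol := (PySem.List.pyRange 0 rows 1).foldl
        (fun s i => s + PySem.List.pyGetD (PySem.List.pyGetD barchart_data i []) j 0) st.2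
      let maxCol := if sumCol > st.1 then sumCol else st.1
      (maxCol, 0)) ((0 : Int), (0 : Int))).1

-- ===== PORT B =====
def getMaxValueBarChart_alt (barchart_data : List (List Int)) : Int :=
  let rows : Int := barchart_data.length
  let cols : Int := if rows > 0 then ((PySem.List.pyGetD barchart_data 0 []).length : Int) else 0
  let colsums : List Int := List.replicate cols.toNat 0
  -- row[j] with j from enumerate: j ≥ 0 always, so row.getD j.toNat 0 = PySem.List.pyGetD row j 0
  -- (lemma pyGetD_natCast); exact on Pre_, where every such j is in range.
  let colsums := barchart_data.foldl (fun cs row =>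
      (PySem.List.enumerate cs).map (fun p => p.2 + row.getD p.1.toNat 0)) colsums
  if cols > 0 then max 0 ((PySem.List.max? colsums (fun y => y)).getD 0) else 0

-- ===== PRECONDITION & SPEC =====
-- Pre_ excludes ragged inputs in which some row is SHORTER than the first row: there the
-- Python A (and B) raise IndexError on barchart_data[i][j].
def Pre_getMaxValueBarChart (barchart_data : List (List Int)) : Prop :=
  ∀ row ∈ barchart_data, (barchart_data.headD []).length ≤ row.length
instance (barchart_data : List (List Int)) : Decidable (Pre_getMaxValueBarChart barchart_data) := by unfold Pre_getMaxValueBarChart; infer_instance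
def pvWitness_getMaxValueBarChart : List (List Int) := [[1, -2], [3, 4]]

def Spec_getMaxValueBarChart (barchart_data : List (List Int)) (out : Int) : Prop := out = getMaxValueBarChart_alt barchart_data
instance (barchart_data : List (List Int)) (out : Int) : Decidable (Spec_getMaxValueBarChart barchart_data out) := by unfold Spec_getMaxValueBarChart; infer_instance

-- ===== CLAIM (what is proved, stated in full; the proofs are below) =====
def Claim_equal_getMaxValueBarChart : Prop := ∀ (barchart_data : List (List Int)), Dom_getMaxValueBarChart barchart_data → Pre_getMaxValueBarChart barchart_data → Spec_getMaxValueBarChart barchart_data (getMaxValueBarChart barchart_data)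

-- ===== LEMMAS AND PROOFS =====

-- the per-column sum both programs compute
def pvColsum (bd : List (List Int)) (j : Int) : Int :=
  bd.foldl (fun s row => s + PySem.List.pyGetD row j 0) 0

-- A's outer loop: the (maxCol, sumCol) state always re-enters with sumCol = 0,
-- so its first component is a running max of the column sums.
theorem aLoop (bd : List (List Int)) (l : List Int) (m : Int) :
    (l.foldl (fun (st : Int × Int) j =>
      let sumCol := (PySem.List.pyRange 0 (bd.length : Int) 1).foldl
        (fun s i => s + PySem.List.pyGetD (PySem.List.pyGetD bd i []) j 0) st.2
      let maxCol := if sumCol > st.1 then sumCol else st.1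
      (maxCol, 0)) (m, (0 : Int))).1
    = l.foldl (fun m j => max m (pvColsum bd j)) m := by
  induction l generalizing m with
  | nil => rfl
  | cons h t ih =>
    simp only [List.foldl_cons]
    rw [ih]
    congr 1
    have hs : (PySem.List.pyRange 0 (bd.length : Int) 1).foldl
        (fun s i => s + PySem.List.pyGetD (PySem.List.pyGetD bd i []) h 0) (0 : Int)
        = pvColsum bd h := by
      rw [PySem.List.foldl_pyRange_zero_pyGetD' bd []
        (fun s row => s + PySem.List.pyGetD row h 0) 0]
      rfl
    rw [hs]
    rw [max_def]
    split_ifs <;> omega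

-- B's accumulation: after folding the whole list, colsums is the table of column sums.
theorem bLoop (bd : List (List Int)) (c : Int) (hc : 0 ≤ c) (g : Int → Int) :
    bd.foldl (fun cs row =>
      (PySem.List.enumerate cs).map (fun p => p.2 + row.getD p.1.toNat 0))
      ((PySem.List.pyRange 0 c 1).map g)
    = (PySem.List.pyRange 0 c 1).map
        (fun j => bd.foldl (fun s row => s + PySem.List.pyGetD row j 0) (g j)) := by
  induction bd generalizing g with
  | nil => rfl
  | cons r t ih =>
    simp only [List.foldl_cons]
    have hlen : PySem.List.len ((PySem.List.pyRange 0 c 1).map g) = c := by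
      simp [PySem.List.length_pyRange_one]
      omega
    have hstep : (PySem.List.enumerate ((PySem.List.pyRange 0 c 1).map g)).map
        (fun p => p.2 + r.getD p.1.toNat 0)
        = (PySem.List.pyRange 0 c 1).map (fun j => g j + PySem.List.pyGetD r j 0) := by
      rw [PySem.List.enumerate_eq_map_pyRange _ (0 : Int), hlen, List.map_map]
      apply List.map_congr_left
      intro j hj
      rw [PySem.List.mem_pyRange_one] at hj
      simp only [Function.comp]
      rw [PySem.List.pyGetD_map_pyRange_of_nonneg g c j 0 hj.1 hj.2,
        ← PySem.List.pyGetD_natCast r j.toNat 0, Int.toNat_of_nonneg hj.1]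
    rw [hstep, ih]

-- pushing a max-with-0 into a running max
theorem maxPush (S : Int → Int) (l : List Int) (c x : Int) :
    l.foldl (fun a j => max a (S j)) (max c x) = max c (l.foldl (fun a j => max a (S j)) x) := by
  induction l generalizing x with
  | nil => rfl
  | cons h t ih => simp only [List.foldl_cons, max_assoc, ih]

theorem replicate_eq_map (c : Int) :
    List.replicate c.toNat (0 : Int) = (PySem.List.pyRange 0 c 1).map (fun _ => 0) := by
  symm
  rw [List.eq_replicate_iff]
  constructor
  · simp [PySem.List.length_pyRange_one]
  · intro b hb
    rcases List.mem_map.mp hb with ⟨a, _, ha⟩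
    omega

-- ===== VERDICT (by name: the statement is the Claim_ definition above) =====
theorem getMaxValueBarChart_spec : Claim_equal_getMaxValueBarChart := by
  intro bd _ _
  unfold Spec_getMaxValueBarChart getMaxValueBarChart getMaxValueBarChart_alt
  simp only []
  set c : Int := if (bd.length : Int) > 0 then ((PySem.List.pyGetD bd 0 []).length : Int) else 0 with hc
  have hc0 : 0 ≤ c := by
    rw [hc]; split_ifs <;> simp
  rw [aLoop bd (PySem.List.pyRange 0 c 1) 0]
  rw [replicate_eq_map c, bLoop bd c hc0 (fun _ => 0)]
  rcases lt_or_ge (0 : Int) c with hpos | hz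
  · rw [if_pos hpos]
    rw [PySem.List.pyRange_one_cons hpos]
    simp only [List.map_cons]
    rw [PySem.List.max?_id_cons]
    simp only [Option.getD_some]
    rw [List.foldl_map, List.foldl_cons]
    simp only [pvColsum]
    have h := maxPush (fun j => List.foldl (fun s row => s + PySem.List.pyGetD row j 0) 0 bd)
      (PySem.List.pyRange 1 c 1) 0
      (List.foldl (fun s row => s + PySem.List.pyGetD row 0 0) 0 bd)
    norm_num at h ⊢
    exact h
  · rw [if_neg (by omega)]
    rw [PySem.List.pyRange_one_eq_nil (by omega)]
    rfl
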